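-- pv_equiv track=rewrite | github.com/Joseftrojkar/PVA | Ukol 4.py | find_interval_sums
-- ===== SOURCE A (Python) =====
-- def find_interval_sums(sequence):
--     intervals = []
--     for i in range(len(sequence)):
--         for j in range(i + 1, len(sequence) + 1):
--             if j - i >= 2:
--                 interval = sequence[i:j]
--                 interval_sum = sum(interval)
--                 intervals.append((i, j - 1, interval_sum))
--     return intervals
-- ===== SOURCE B (Python) =====
-- def find_interval_sums(sequence):
--     n = len(sequence)
--     prefix = [0]
--     acc = 0
--     for x in sequence:
--         acc += x
--         prefix.append(acc)
--     result = []
--     for i in range(n):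
--         for j in range(i + 2, n + 1):
--             result.append((i, j - 1, prefix[j] - prefix[i]))
--     return result
-- ===== Notes on version B (the rewrite author's own statement) =====
-- stated objective: faster
-- what changed: B precomputes a prefix-sum array once and reads each interval sum as prefix[j]-prefix[i] in O(1), replacing A's per-interval slice-and-sum, and iterates j from i+2 directly instead of filtering with the j-i>=2 test.
import Mathlib
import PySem

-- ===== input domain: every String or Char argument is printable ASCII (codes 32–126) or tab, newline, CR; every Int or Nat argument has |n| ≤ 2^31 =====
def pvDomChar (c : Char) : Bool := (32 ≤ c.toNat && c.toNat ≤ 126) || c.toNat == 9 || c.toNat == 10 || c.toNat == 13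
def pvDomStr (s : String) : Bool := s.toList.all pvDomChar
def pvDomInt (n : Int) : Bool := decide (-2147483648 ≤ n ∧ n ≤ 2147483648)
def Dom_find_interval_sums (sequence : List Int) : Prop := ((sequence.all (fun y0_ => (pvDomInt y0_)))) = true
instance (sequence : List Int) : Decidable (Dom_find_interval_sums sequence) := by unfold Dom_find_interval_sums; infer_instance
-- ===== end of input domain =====

-- B replaces A's per-interval slice-and-sum by a prefix-sum array (O(n^2) instead of O(n^3));
-- a timing run measured B faster on the largest inputs.

-- ===== PORT A =====
def find_interval_sums (sequence : List Int) : List (Int × Int × Int) :=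
  (PySem.List.pyRange 0 sequence.length).foldl (fun intervals i =>
    (PySem.List.pyRange (i + 1) (sequence.length + 1)).foldl (fun intervals j =>
      if j - i ≥ 2 then
        let interval := PySem.List.slice sequence (some i) (some j)
        let interval_sum := interval.sum
        intervals ++ [(i, j - 1, interval_sum)]
      else intervals) intervals) []

-- ===== PORT B =====
def find_interval_sums_alt (sequence : List Int) : List (Int × Int × Int) :=
  let n : Int := sequence.length
  let st := sequence.foldl (fun (s : List Int × Int) x => (s.1 ++ [s.2 + x], s.2 + x)) ([0], 0)
  let pref := st.1
  (PySem.List.pyRange 0 n).foldl (fun result i =>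
    (PySem.List.pyRange (i + 2) (n + 1)).foldl (fun result j =>
      result ++ [(i, j - 1, PySem.List.pyGetD pref j 0 - PySem.List.pyGetD pref i 0)]) result) []

-- ===== PRECONDITION & SPEC =====
def Spec_find_interval_sums (sequence : List Int) (out : List (Int × Int × Int)) : Prop := out = find_interval_sums_alt sequence
instance (sequence : List Int) (out : List (Int × Int × Int)) : Decidable (Spec_find_interval_sums sequence out) := by unfold Spec_find_interval_sums; infer_instance

-- ===== CLAIM (what is proved, stated in full; the proofs are below) =====
def Claim_equal_find_interval_sums : Prop := ∀ (sequence : List Int), Dom_find_interval_sums sequence → Spec_find_interval_sums sequence (find_interval_sums sequence)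

-- ===== LEMMAS AND PROOFS =====

-- The prefix-sum loop of B: its list component is [sum(xs.take k) for k in range(len(xs)+1)] (shifted by the start state).
theorem pvPrefixFold (xs : List Int) (l : List Int) (a : Int) :
    (xs.foldl (fun (s : List Int × Int) x => (s.1 ++ [s.2 + x], s.2 + x)) (l, a)).1
      = l ++ (List.range xs.length).map (fun k => a + (xs.take (k + 1)).sum) := by
  induction xs generalizing l a with
  | nil => simp
  | cons x t ih =>
    simp only [List.foldl_cons, List.length_cons, ih, List.range_succ_eq_map]
    simp [List.map_map, Function.comp, List.append_assoc, add_assoc]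

theorem pvPrefixSpec (xs : List Int) :
    (xs.foldl (fun (s : List Int × Int) x => (s.1 ++ [s.2 + x], s.2 + x)) ([0], 0)).1
      = (List.range (xs.length + 1)).map (fun k => (xs.take k).sum) := by
  rw [pvPrefixFold, List.range_succ_eq_map]
  simp [List.map_map, Function.comp]

-- An empty Python range.
theorem pvPyRangeNil {a b : Int} (h : b ≤ a) : PySem.List.pyRange a b = [] := by
  apply List.eq_nil_iff_forall_not_mem.mpr
  intro x hx
  have := PySem.List.mem_pyRange_one.mp hx
  omega

-- A's inner filter 'j - i >= 2' over range(i+1, hi) is exactly range(i+2, hi).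
theorem pvFilterRange (i hi : Int) :
    (PySem.List.pyRange (i + 1) hi).filter (fun j => decide (j - i ≥ 2))
      = PySem.List.pyRange (i + 2) hi := by
  by_cases h : i + 1 < hi
  · rw [PySem.List.pyRange_one_cons h]
    have h1 : (decide ((i + 1) - i ≥ 2)) = false := by simp
    simp only [List.filter_cons, h1, if_neg Bool.false_ne_true]
    rw [show i + 1 + 1 = i + 2 by ring]
    · apply List.filter_eq_self.mpr
      intro j hj
      have := PySem.List.mem_pyRange_one.mp hj
      simp; omega
  · rw [pvPyRangeNil (by omega), pvPyRangeNil (by omega)]; rfl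

-- Interval sum as a difference of prefix sums.
theorem pvSliceSum (xs : List Int) (a b : Nat) (hab : a ≤ b) :
    ((xs.drop a).take (b - a)).sum = (xs.take b).sum - (xs.take a).sum := by
  have : xs.take b = xs.take a ++ (xs.drop a).take (b - a) := by
    rw [← List.take_add (i := a) (j := b - a) (l := xs)]
    congr 1; omega
  rw [this, List.sum_append]; ring

-- ===== VERDICT (by name: the statement is the Claim_ definition above) =====
theorem find_interval_sums_spec : Claim_equal_find_interval_sums := by
  intro xs _
  show find_interval_sums xs = find_interval_sums_alt xs
  unfold find_interval_sums find_interval_sums_alt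
  simp only [pvPrefixSpec]
  -- turn both nested appending loops into flatMaps
  have hA : ∀ (i : Int) (acc : List (Int × Int × Int)),
      (PySem.List.pyRange (i + 1) ((xs.length : Int) + 1)).foldl (fun intervals j =>
        if j - i ≥ 2 then
          intervals ++ [(i, j - 1, (PySem.List.slice xs (some i) (some j)).sum)]
        else intervals) acc
      = acc ++ ((PySem.List.pyRange (i + 1) ((xs.length : Int) + 1)).filter
          (fun j => decide (j - i ≥ 2))).map
          (fun j => (i, j - 1, (PySem.List.slice xs (some i) (some j)).sum)) := by
    intro i acc
    exact PySem.List.foldl_append_ite (fun j => j - i ≥ 2)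
      (fun j => (i, j - 1, (PySem.List.slice xs (some i) (some j)).sum)) _ acc
  simp only [hA]
  rw [show (fun (intervals : List (Int × Int × Int)) (i : Int) =>
        intervals ++ ((PySem.List.pyRange (i + 1) ((xs.length : Int) + 1)).filter
          (fun j => decide (j - i ≥ 2))).map
          (fun j => (i, j - 1, (PySem.List.slice xs (some i) (some j)).sum)))
      = (fun intervals i => intervals ++
          (fun i => ((PySem.List.pyRange (i + 1) ((xs.length : Int) + 1)).filter
            (fun j => decide (j - i ≥ 2))).map
            (fun j => (i, j - 1, (PySem.List.slice xs (some i) (some j)).sum))) i) from rfl,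
      PySem.List.foldl_append_eq_flatMap]
  have hB : ∀ (i : Int) (acc : List (Int × Int × Int)),
      (PySem.List.pyRange (i + 2) ((xs.length : Int) + 1)).foldl (fun result j =>
        result ++ [(i, j - 1,
          PySem.List.pyGetD ((List.range (xs.length + 1)).map (fun k => (xs.take k).sum)) j 0
          - PySem.List.pyGetD ((List.range (xs.length + 1)).map (fun k => (xs.take k).sum)) i 0)]) acc
      = acc ++ (PySem.List.pyRange (i + 2) ((xs.length : Int) + 1)).map
          (fun j => (i, j - 1,
            PySem.List.pyGetD ((List.range (xs.length + 1)).map (fun k => (xs.take k).sum)) j 0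
            - PySem.List.pyGetD ((List.range (xs.length + 1)).map (fun k => (xs.take k).sum)) i 0)) := by
    intro i acc
    exact PySem.List.foldl_append_singleton_eq_map _ _ _
  simp only [hB]
  rw [show (fun (result : List (Int × Int × Int)) (i : Int) =>
        result ++ (PySem.List.pyRange (i + 2) ((xs.length : Int) + 1)).map
          (fun j => (i, j - 1,
            PySem.List.pyGetD ((List.range (xs.length + 1)).map (fun k => (xs.take k).sum)) j 0
            - PySem.List.pyGetD ((List.range (xs.length + 1)).map (fun k => (xs.take k).sum)) i 0)))
      = (fun result i => result ++
          (fun i => (PySem.List.pyRange (i + 2) ((xs.length : Int) + 1)).map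
            (fun j => (i, j - 1,
              PySem.List.pyGetD ((List.range (xs.length + 1)).map (fun k => (xs.take k).sum)) j 0
              - PySem.List.pyGetD ((List.range (xs.length + 1)).map (fun k => (xs.take k).sum)) i 0))) i) from rfl,
      PySem.List.foldl_append_eq_flatMap]
  simp only [List.nil_append]
  apply List.flatMap_congr
  intro i hi
  have hib := PySem.List.mem_pyRange_one.mp hi
  rw [pvFilterRange]
  apply List.map_congr_left
  intro j hj
  have hjb := PySem.List.mem_pyRange_one.mp hj
  have hi0 : 0 ≤ i := hib.1
  have hj0 : 0 ≤ j := by omega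
  refine Prod.ext rfl (Prod.ext rfl ?_)
  show (PySem.List.slice xs (some i) (some j)).sum = _
  rw [PySem.List.slice_toNat xs hi0 hj0,
      PySem.List.pyGetD_of_nonneg _ _ hj0, PySem.List.pyGetD_of_nonneg _ _ hi0,
      PySem.List.getD_map_range _ _ _ _ (by omega),
      PySem.List.getD_map_range _ _ _ _ (by omega),
      pvSliceSum xs i.toNat j.toNat (by omega)]
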